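-- pv_equiv track=rewrite | github.com/suizokukan/katal | faked/src/board_txtrepr.py | get_console_repr_of_board__2
-- ===== SOURCE A (Python) =====
-- def get_console_repr_of_board__2(consolecharacters_table, xmin, ymin, xmax, ymax):
--     """
--             second layer : the digits()
--
--             function called by get_board_textrepr().
--     """
--     for y in range((ymin-1)*4, (ymax+1)*4):
--         y_index = int((y-2) / 4)
--         for x in range((xmin-1)*4, (xmax+1)*4):
--             x_index = int(x / 4)
--
--             if x == (xmin-1)*4 and (y-2)%4 == 0:
--                 y_index_repr = "{0:+03}".format(y_index)
--                 consolecharacters_table[(x, y)] = y_index_repr[0]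
--                 consolecharacters_table[(x+1, y)] = y_index_repr[1]
--                 consolecharacters_table[(x+2, y)] = y_index_repr[2]
--
--             if x == ((xmax+1)*4)-2 and (y-2)%4 == 0:
--                 y_index_repr = "{0:+03}".format(y_index)
--                 consolecharacters_table[(x-1, y)] = y_index_repr[0]
--                 consolecharacters_table[(x, y)] = y_index_repr[1]
--                 consolecharacters_table[(x+1, y)] = y_index_repr[2]
--
--             if x%4 == 0 and x != (xmin-1)*4 and y == (ymin-1)*4:
--                 x_index_repr = "{0:+03}".format(x_index)
--                 consolecharacters_table[(x-1, y)] = x_index_repr[0]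
--                 consolecharacters_table[(x, y)] = x_index_repr[1]
--                 consolecharacters_table[(x+1, y)] = x_index_repr[2]
--
--             if x%4 == 0 and x != (xmin-1)*4 and y == ((ymax+1)*4)-1:
--                 x_index_repr = "{0:+03}".format(x_index)
--                 consolecharacters_table[(x-1, y)] = x_index_repr[0]
--                 consolecharacters_table[(x, y)] = x_index_repr[1]
--                 consolecharacters_table[(x+1, y)] = x_index_repr[2]
--
--     return consolecharacters_table
-- ===== SOURCE B (Python) =====
-- def get_console_repr_of_board__2(consolecharacters_table, xmin, ymin, xmax, ymax):
--     """Border-only rewrite: visit just the label cells instead of scanning the whole grid."""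
--     x0, xend = (xmin - 1) * 4, (xmax + 1) * 4
--     y0, yend = (ymin - 1) * 4, (ymax + 1) * 4
--     if x0 >= xend or y0 >= yend:
--         return consolecharacters_table
--
--     def put3(x, y, n):
--         s = "{0:+03}".format(n)
--         consolecharacters_table[(x, y)] = s[0]
--         consolecharacters_table[(x + 1, y)] = s[1]
--         consolecharacters_table[(x + 2, y)] = s[2]
--
--     # top border row: column indices at every x = 4k, k in [xmin, xmax]
--     for k in range(xmin, xmax + 1):
--         put3(4 * k - 1, y0, k)
--     # left and right border columns: row indices at every y = 4j + 2
--     for j in range(ymin - 1, ymax + 1):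
--         y = 4 * j + 2
--         put3(x0, y, j)
--         put3(xend - 3, y, j)
--     # bottom border row
--     for k in range(xmin, xmax + 1):
--         put3(4 * k - 1, yend - 1, k)
--     return consolecharacters_table
-- ===== Notes on version B (the rewrite author's own statement) =====
-- stated objective: alternative
-- what changed: Instead of scanning every cell of the grid rectangle and testing four border conditions at each, B iterates directly over the three border label groups (top row, left/right columns, bottom row) in the same global write order, touching only the labelled cells.
import Mathlib
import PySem

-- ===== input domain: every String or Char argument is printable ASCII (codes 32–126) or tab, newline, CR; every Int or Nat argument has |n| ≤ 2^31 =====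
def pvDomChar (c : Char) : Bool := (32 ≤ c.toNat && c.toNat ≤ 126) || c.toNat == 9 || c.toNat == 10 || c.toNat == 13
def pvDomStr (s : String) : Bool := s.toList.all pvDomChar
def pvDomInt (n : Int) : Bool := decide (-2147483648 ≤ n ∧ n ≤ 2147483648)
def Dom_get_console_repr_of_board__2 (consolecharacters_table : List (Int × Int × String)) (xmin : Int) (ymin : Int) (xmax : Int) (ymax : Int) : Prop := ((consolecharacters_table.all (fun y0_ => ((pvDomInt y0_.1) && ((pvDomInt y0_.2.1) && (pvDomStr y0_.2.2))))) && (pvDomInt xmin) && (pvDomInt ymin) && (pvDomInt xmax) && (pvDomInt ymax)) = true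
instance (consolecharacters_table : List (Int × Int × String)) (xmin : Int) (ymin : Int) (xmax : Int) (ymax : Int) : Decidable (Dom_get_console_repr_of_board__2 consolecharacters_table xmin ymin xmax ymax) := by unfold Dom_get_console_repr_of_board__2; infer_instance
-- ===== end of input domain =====

-- B replaces A's full-grid scan by direct iteration over the three border label groups,
-- performing the identical dict writes in the identical order.
-- (Both the Python A and the Python B mutate the dict argument in place and return it;
-- the equivalence proved here is about the returned value.)

-- shared dict-assignment primitive on the flat association list: d[(x,y)] = v
-- (overwrite the first matching key in place, else append — Python dict assignment)
def dput (d : List (Int × Int × String)) (x y : Int) (v : String) : List (Int × Int × String) :=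
  match d with
  | [] => [(x, y, v)]
  | (a, b, w) :: rest => if a = x ∧ b = y then (a, b, v) :: rest else (a, b, w) :: dput rest x y v

-- "{0:+03}".format(n): sign, then str(|n|) zero-padded to width 2 — exact for every Int
def pvFmt3 (n : Int) : List Char :=
  let s := PySem.Int.toChars n
  let ds := if n < 0 then s.drop 1 else s
  (if n < 0 then '-' else '+') :: (if ds.length < 2 then '0' :: ds else ds)

-- s[k] as a 1-character string (pvFmt3 always has length ≥ 3, so k=0,1,2 never raises)
def pvAt (cs : List Char) (k : Nat) : String := String.ofList [cs.getD k ' ']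

-- ===== PORT A =====
def get_console_repr_of_board__2 (consolecharacters_table : List (Int × Int × String)) (xmin : Int) (ymin : Int) (xmax : Int) (ymax : Int) : List (Int × Int × String) :=
  (PySem.List.pyRange ((ymin-1)*4) ((ymax+1)*4) 1).foldl (fun d y =>
    let y_index := PySem.Int.truncdiv (y-2) 4   -- int((y-2)/4): exact, |y-2| < 2^53
    (PySem.List.pyRange ((xmin-1)*4) ((xmax+1)*4) 1).foldl (fun d x =>
      let x_index := PySem.Int.truncdiv x 4     -- int(x/4)
      let d := if x = (xmin-1)*4 ∧ PySem.Int.mod (y-2) 4 = 0 then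
          let r := pvFmt3 y_index
          dput (dput (dput d x y (pvAt r 0)) (x+1) y (pvAt r 1)) (x+2) y (pvAt r 2)
        else d
      let d := if x = ((xmax+1)*4) - 2 ∧ PySem.Int.mod (y-2) 4 = 0 then
          let r := pvFmt3 y_index
          dput (dput (dput d (x-1) y (pvAt r 0)) x y (pvAt r 1)) (x+1) y (pvAt r 2)
        else d
      let d := if PySem.Int.mod x 4 = 0 ∧ x ≠ (xmin-1)*4 ∧ y = (ymin-1)*4 then
          let r := pvFmt3 x_index
          dput (dput (dput d (x-1) y (pvAt r 0)) x y (pvAt r 1)) (x+1) y (pvAt r 2)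
        else d
      let d := if PySem.Int.mod x 4 = 0 ∧ x ≠ (xmin-1)*4 ∧ y = ((ymax+1)*4) - 1 then
          let r := pvFmt3 x_index
          dput (dput (dput d (x-1) y (pvAt r 0)) x y (pvAt r 1)) (x+1) y (pvAt r 2)
        else d
      d) d) consolecharacters_table

-- ===== PORT B =====
-- put3: write the three characters of "{0:+03}".format(n) at (x,y),(x+1,y),(x+2,y)
def pvPut3 (d : List (Int × Int × String)) (x y n : Int) : List (Int × Int × String) :=
  let s := pvFmt3 n
  dput (dput (dput d x y (pvAt s 0)) (x+1) y (pvAt s 1)) (x+2) y (pvAt s 2)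

def get_console_repr_of_board__2_alt (consolecharacters_table : List (Int × Int × String)) (xmin : Int) (ymin : Int) (xmax : Int) (ymax : Int) : List (Int × Int × String) :=
  let x0 := (xmin-1)*4
  let xend := (xmax+1)*4
  let y0 := (ymin-1)*4
  let yend := (ymax+1)*4
  if xend ≤ x0 ∨ yend ≤ y0 then consolecharacters_table
  else
    let t := (PySem.List.pyRange xmin (xmax+1) 1).foldl (fun d k => pvPut3 d (4*k-1) y0 k) consolecharacters_table
    let t := (PySem.List.pyRange (ymin-1) (ymax+1) 1).foldl (fun d j =>
        pvPut3 (pvPut3 d x0 (4*j+2) j) (xend-3) (4*j+2) j) t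
    (PySem.List.pyRange xmin (xmax+1) 1).foldl (fun d k => pvPut3 d (4*k-1) (yend-1) k) t

-- ===== PRECONDITION & SPEC =====
-- Pre_ excludes association lists with duplicate (x,y) keys: such a list does not represent
-- a Python dict (the conversion collapses duplicates), so A's value there is an artefact.
def Pre_get_console_repr_of_board__2 (consolecharacters_table : List (Int × Int × String)) (xmin : Int) (ymin : Int) (xmax : Int) (ymax : Int) : Prop :=
  (consolecharacters_table.map (fun e => (e.1, e.2.1))).Nodup
instance (consolecharacters_table : List (Int × Int × String)) (xmin : Int) (ymin : Int) (xmax : Int) (ymax : Int) : Decidable (Pre_get_console_repr_of_board__2 consolecharacters_table xmin ymin xmax ymax) := by unfold Pre_get_console_repr_of_board__2; infer_instance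

def pvWitness_get_console_repr_of_board__2 : (List (Int × Int × String)) × Int × Int × Int × Int :=
  ([(0, 0, "."), (1, 2, "#")], 0, 0, 0, 0)

def Spec_get_console_repr_of_board__2 (consolecharacters_table : List (Int × Int × String)) (xmin : Int) (ymin : Int) (xmax : Int) (ymax : Int) (out : List (Int × Int × String)) : Prop := out = get_console_repr_of_board__2_alt consolecharacters_table xmin ymin xmax ymax
instance (consolecharacters_table : List (Int × Int × String)) (xmin : Int) (ymin : Int) (xmax : Int) (ymax : Int) (out : List (Int × Int × String)) : Decidable (Spec_get_console_repr_of_board__2 consolecharacters_table xmin ymin xmax ymax out) := by unfold Spec_get_console_repr_of_board__2; infer_instance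

-- ===== CLAIM (what is proved, stated in full; the proofs are below) =====
def Claim_equal_get_console_repr_of_board__2 : Prop := ∀ (consolecharacters_table : List (Int × Int × String)) (xmin : Int) (ymin : Int) (xmax : Int) (ymax : Int), Dom_get_console_repr_of_board__2 consolecharacters_table xmin ymin xmax ymax → Pre_get_console_repr_of_board__2 consolecharacters_table xmin ymin xmax ymax → Spec_get_console_repr_of_board__2 consolecharacters_table xmin ymin xmax ymax (get_console_repr_of_board__2 consolecharacters_table xmin ymin xmax ymax)

-- ===== LEMMAS AND PROOFS =====

-- normalized inner-loop action of A at a cell (x,y) that carries a label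
def pvAct (xmin xmax y : Int) (d : List (Int × Int × String)) (x : Int) : List (Int × Int × String) :=
  if x = (xmin-1)*4 then pvPut3 d x y (PySem.Int.truncdiv (y-2) 4)
  else if x = (xmax+1)*4 - 2 then pvPut3 d (x-1) y (PySem.Int.truncdiv (y-2) 4)
  else pvPut3 d (x-1) y (PySem.Int.truncdiv x 4)

-- the cells of row y at which A writes
abbrev pvP (xmin ymin xmax ymax y x : Int) : Prop :=
  ((y-2) % 4 = 0 ∧ (x = (xmin-1)*4 ∨ x = (xmax+1)*4 - 2)) ∨
  ((y = (ymin-1)*4 ∨ y = (ymax+1)*4 - 1) ∧ x % 4 = 0 ∧ x ≠ (xmin-1)*4)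

-- the rows in which A writes at all
abbrev pvQ (ymin ymax y : Int) : Prop :=
  y = (ymin-1)*4 ∨ (y-2) % 4 = 0 ∨ y = (ymax+1)*4 - 1

def pvRow (xmin xmax y : Int) (d : List (Int × Int × String)) : List (Int × Int × String) :=
  (PySem.List.pyRange xmin (xmax+1) 1).foldl (fun d k => pvPut3 d (4*k-1) y k) d

-- what A does in a writing row
def pvG (xmin xmax y : Int) (d : List (Int × Int × String)) : List (Int × Int × String) :=
  if (y-2) % 4 = 0 then
    pvPut3 (pvPut3 d ((xmin-1)*4) y (PySem.Int.truncdiv (y-2) 4)) ((xmax+1)*4 - 2 - 1) y (PySem.Int.truncdiv (y-2) 4)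
  else pvRow xmin xmax y d

-- A, with the dead grid iterations of the inner loop filtered away
lemma portA_eq_filtered (t : List (Int × Int × String)) (xmin ymin xmax ymax : Int) :
    get_console_repr_of_board__2 t xmin ymin xmax ymax
    = (PySem.List.pyRange ((ymin-1)*4) ((ymax+1)*4) 1).foldl (fun d y =>
        List.foldl (pvAct xmin xmax y) d
          ((PySem.List.pyRange ((xmin-1)*4) ((xmax+1)*4) 1).filter
            (fun x => decide (pvP xmin ymin xmax ymax y x)))) t := by
  unfold get_console_repr_of_board__2
  apply PySem.List.foldl_congr_mem
  intro acc y _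
  rw [← PySem.List.foldl_ite_eq_foldl_filter (pvP xmin ymin xmax ymax y) (pvAct xmin xmax y)]
  apply PySem.List.foldl_congr_mem
  intro d x _
  simp only [PySem.Int.mod_eq_emod_of_pos (show (0:Int) < 4 by norm_num), pvP, pvAct, pvPut3]
  split_ifs <;>
    first
      | rfl
      | omega
      | rw [show x - 1 + 1 = x from by ring, show x - 1 + 2 = x + 1 from by ring]

lemma filter_pair (a u v b : Int) (h1 : a ≤ u) (h2 : u < v) (h3 : v < b) :
    (PySem.List.pyRange a b 1).filter (fun x => decide (x = u ∨ x = v)) = [u, v] := by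
  rw [PySem.List.pyRange_one_append a u b (by omega) (by omega),
      PySem.List.pyRange_one_cons (show u < b by omega),
      PySem.List.pyRange_one_append (u+1) v b (by omega) (by omega),
      PySem.List.pyRange_one_cons (show v < b by omega)]
  simp only [List.filter_append, List.filter_cons]
  rw [List.filter_eq_nil_iff.mpr ?_, List.filter_eq_nil_iff.mpr ?_, List.filter_eq_nil_iff.mpr ?_]
  · simp
  · intro x hx; rw [PySem.List.mem_pyRange_one] at hx; simp only [decide_eq_true_eq]; omega
  · intro x hx; rw [PySem.List.mem_pyRange_one] at hx; simp only [decide_eq_true_eq]; omega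
  · intro x hx; rw [PySem.List.mem_pyRange_one] at hx; simp only [decide_eq_true_eq]; omega

lemma filt_lin (r : Int) :
    ∀ (n : Nat) (a b : Int), (b - a).toNat = n →
      (PySem.List.pyRange (4*a+r) (4*b+r) 1).filter (fun x => decide (x % 4 = r % 4))
        = (PySem.List.pyRange a b 1).map (fun k => 4*k+r) := by
  intro n
  induction n with
  | zero =>
    intro a b h
    rw [PySem.List.pyRange_one_eq_nil (by omega), PySem.List.pyRange_one_eq_nil (by omega)]
    simp
  | succ m ih =>
    intro a b h
    have hab : a < b := by omega
    rw [PySem.List.pyRange_one_append (4*a+r) (4*(a+1)+r) (4*b+r) (by omega) (by omega),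
        PySem.List.pyRange_one_append (4*a+r) (4*a+r+1) (4*(a+1)+r) (by omega) (by omega),
        PySem.List.pyRange_one_singleton, PySem.List.pyRange_one_cons hab]
    simp only [List.filter_append, List.filter_cons, List.filter_nil, List.map_cons]
    rw [if_pos (by simp only [decide_eq_true_eq]; omega),
        List.filter_eq_nil_iff.mpr ?_, ih (a+1) b (by omega)]
    · simp
    · intro x hx; rw [PySem.List.mem_pyRange_one] at hx; simp only [decide_eq_true_eq]; omega

lemma filt_mult_ne (a b : Int) :
    (PySem.List.pyRange (4*a) (4*b) 1).filter (fun x => decide (x % 4 = 0 ∧ x ≠ 4*a))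
      = (PySem.List.pyRange (a+1) b 1).map (fun k => 4*k) := by
  rcases (by omega : b ≤ a ∨ a < b) with h | h
  · rw [PySem.List.pyRange_one_eq_nil (by omega), PySem.List.pyRange_one_eq_nil (by omega)]
    simp
  · rw [PySem.List.pyRange_one_append (4*a) (4*(a+1)) (4*b) (by omega) (by omega)]
    rw [List.filter_append, List.filter_eq_nil_iff.mpr ?_]
    · rw [List.filter_congr (q := fun x => decide (x % 4 = 0 % 4)) ?_]
      · have e0 : (4:Int)*(a+1) = 4*(a+1) + 0 := by ring
        have e1 : (4:Int)*b = 4*b + 0 := by ring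
        rw [e0, e1, filt_lin 0 (b - (a+1)).toNat (a+1) b rfl]
        simp
      · intro x hx; rw [PySem.List.mem_pyRange_one] at hx
        simp only [decide_eq_decide]; omega
    · intro x hx; rw [PySem.List.mem_pyRange_one] at hx; simp only [decide_eq_true_eq]; omega

-- inner fold, row-label case
lemma inner_row (xmin ymin xmax ymax y : Int) (d : List (Int × Int × String))
    (hy : y = (ymin-1)*4 ∨ y = (ymax+1)*4 - 1) :
    List.foldl (pvAct xmin xmax y) d
      ((PySem.List.pyRange ((xmin-1)*4) ((xmax+1)*4) 1).filter
        (fun x => decide (pvP xmin ymin xmax ymax y x)))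
    = pvRow xmin xmax y d := by
  have e0 : (xmin-1)*4 = 4*(xmin-1) := by ring
  have e1 : (xmax+1)*4 = 4*(xmax+1) := by ring
  rw [List.filter_congr (q := fun x => decide (x % 4 = 0 ∧ x ≠ 4*(xmin-1))) ?_]
  · rw [e0, e1, filt_mult_ne (xmin-1) (xmax+1)]
    have e2 : xmin - 1 + 1 = xmin := by ring
    rw [e2, List.foldl_map]
    unfold pvRow
    apply PySem.List.foldl_congr_mem
    intro acc k hk
    rw [PySem.List.mem_pyRange_one] at hk
    unfold pvAct
    rw [if_neg (by omega), if_neg (by omega)]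
    simp only [PySem.Int.truncdiv]
    rw [Int.mul_tdiv_cancel_left k (by norm_num : (4:Int) ≠ 0)]
  · intro x hx
    rw [PySem.List.mem_pyRange_one] at hx
    simp only [decide_eq_decide]
    unfold pvP
    constructor
    · rintro (⟨h2, _⟩ | ⟨_, h2, h3⟩) <;> [omega; exact ⟨h2, by omega⟩]
    · rintro ⟨h2, h3⟩; right; exact ⟨hy, h2, by omega⟩

-- inner fold, side-label case
lemma inner_side (xmin ymin xmax ymax y : Int) (d : List (Int × Int × String))
    (hy : (y-2) % 4 = 0) (hx : xmin ≤ xmax + 1) :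
    List.foldl (pvAct xmin xmax y) d
      ((PySem.List.pyRange ((xmin-1)*4) ((xmax+1)*4) 1).filter
        (fun x => decide (pvP xmin ymin xmax ymax y x)))
    = pvPut3 (pvPut3 d ((xmin-1)*4) y (PySem.Int.truncdiv (y-2) 4)) ((xmax+1)*4 - 2 - 1) y
        (PySem.Int.truncdiv (y-2) 4) := by
  rw [List.filter_congr (q := fun x => decide (x = (xmin-1)*4 ∨ x = (xmax+1)*4 - 2)) ?_]
  · rw [filter_pair ((xmin-1)*4) ((xmin-1)*4) ((xmax+1)*4 - 2) ((xmax+1)*4) (le_refl _)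
        (by omega) (by omega)]
    simp only [List.foldl_cons, List.foldl_nil]
    unfold pvAct
    rw [if_pos rfl, if_neg (by omega), if_pos rfl]
  · intro x hx'
    rw [PySem.List.mem_pyRange_one] at hx'
    simp only [decide_eq_decide]
    unfold pvP
    constructor
    · rintro (⟨_, h⟩ | ⟨hyy, _, _⟩) <;> [exact h; omega]
    · intro h; left; exact ⟨hy, h⟩

-- inner fold, silent-row case
lemma inner_skip (xmin ymin xmax ymax y : Int) (d : List (Int × Int × String))
    (hy : ¬ pvQ ymin ymax y) :
    List.foldl (pvAct xmin xmax y) d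
      ((PySem.List.pyRange ((xmin-1)*4) ((xmax+1)*4) 1).filter
        (fun x => decide (pvP xmin ymin xmax ymax y x)))
    = d := by
  rw [List.filter_eq_nil_iff.mpr ?_]
  · rfl
  · intro x hx
    rw [PySem.List.mem_pyRange_one] at hx
    simp only [decide_eq_true_eq]
    unfold pvP; unfold pvQ at hy
    rintro (⟨h, _⟩ | ⟨h, _, _⟩) <;> exact hy (by tauto)

-- the writing rows of the y-range, in order
lemma filtQ (ymin ymax : Int) (h : ymin - 1 ≤ ymax) :
    (PySem.List.pyRange ((ymin-1)*4) ((ymax+1)*4) 1).filter (fun y => decide (pvQ ymin ymax y))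
    = (ymin-1)*4 :: (((PySem.List.pyRange (ymin-1) (ymax+1) 1).map (fun j => 4*j+2))
        ++ [(ymax+1)*4 - 1]) := by
  set a := ymin - 1 with ha
  set b := ymax + 1 with hb
  have s1 : PySem.List.pyRange (a*4) (a*4+1) 1 = [a*4] := PySem.List.pyRange_one_singleton _
  have s2 : PySem.List.pyRange (a*4+1) (a*4+2) 1 = [a*4+1] := by
    have := PySem.List.pyRange_one_singleton (a*4+1)
    rw [show a*4+1+1 = a*4+2 from by ring] at this; exact this
  have s3 : PySem.List.pyRange (b*4-2) (b*4-1) 1 = [b*4-2] := by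
    have := PySem.List.pyRange_one_singleton (b*4-2)
    rw [show b*4-2+1 = b*4-1 from by ring] at this; exact this
  have s4 : PySem.List.pyRange (b*4-1) (b*4) 1 = [b*4-1] := by
    have := PySem.List.pyRange_one_singleton (b*4-1)
    rw [show b*4-1+1 = b*4 from by ring] at this; exact this
  conv_lhs =>
    rw [show PySem.List.pyRange (a*4) (b*4) 1
          = [a*4] ++ ([a*4+1] ++ (PySem.List.pyRange (a*4+2) (b*4-2) 1 ++ [b*4-2]) ++ [b*4-1]) from by
      rw [PySem.List.pyRange_one_append (a*4) (a*4+1) (b*4) (by omega) (by omega),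
          PySem.List.pyRange_one_append (a*4+1) (b*4-1) (b*4) (by omega) (by omega),
          PySem.List.pyRange_one_append (a*4+1) (a*4+2) (b*4-1) (by omega) (by omega),
          PySem.List.pyRange_one_append (a*4+2) (b*4-2) (b*4-1) (by omega) (by omega),
          s1, s2, s3, s4]]
  simp only [List.filter_append, List.filter_cons, List.filter_nil]
  rw [if_pos (by simp only [decide_eq_true_eq]; left; omega),
      if_neg (by simp only [decide_eq_true_eq]; unfold pvQ; omega),
      if_pos (by simp only [decide_eq_true_eq]; right; left; omega),
      if_pos (by simp only [decide_eq_true_eq]; right; right; omega)]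
  rw [List.filter_congr (q := fun y => decide (y % 4 = 2 % 4))
        (by intro y hy; rw [PySem.List.mem_pyRange_one] at hy
            simp only [decide_eq_decide]; unfold pvQ; omega)]
  rw [show PySem.List.pyRange (a*4+2) (b*4-2) 1 = PySem.List.pyRange (4*a+2) (4*(b-1)+2) 1 from by
        rw [show a*4+2 = 4*a+2 from by ring, show b*4-2 = 4*(b-1)+2 from by ring],
      filt_lin 2 ((b-1) - a).toNat a (b-1) rfl]
  rw [show PySem.List.pyRange a b 1 = PySem.List.pyRange a (b-1) 1 ++ [b-1] from by
        have := PySem.List.pyRange_one_succ_right (show a ≤ b-1 by omega)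
        rw [show b-1+1 = b from by ring] at this; exact this]
  simp only [List.map_append, List.map_cons, List.map_nil, List.cons_append, List.nil_append,
    List.append_assoc]
  rw [show 4*(b-1)+2 = b*4-2 from by ring, show (a:Int)*4 = a*4 from rfl]

-- ===== VERDICT (by name: the statement is the Claim_ definition above) =====
theorem get_console_repr_of_board__2_spec : Claim_equal_get_console_repr_of_board__2 := by
  intro t xmin ymin xmax ymax _ _
  unfold Spec_get_console_repr_of_board__2 get_console_repr_of_board__2_alt
  rw [portA_eq_filtered]
  by_cases hempty : (xmax+1)*4 ≤ (xmin-1)*4 ∨ (ymax+1)*4 ≤ (ymin-1)*4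
  · rw [if_pos hempty]
    rcases hempty with h | h
    · rw [PySem.List.pyRange_one_eq_nil (a := (xmin-1)*4) (by omega)]
      simp [List.foldl_fixed]
    · rw [PySem.List.pyRange_one_eq_nil (a := (ymin-1)*4) (by omega)]
      rfl
  · rw [if_neg hempty]
    have hx : xmin ≤ xmax + 1 := by omega
    have hy : ymin - 1 ≤ ymax := by omega
    have step : ∀ (acc : List (Int × Int × String)), ∀ y ∈ PySem.List.pyRange ((ymin-1)*4) ((ymax+1)*4) 1,
        List.foldl (pvAct xmin xmax y) acc
          ((PySem.List.pyRange ((xmin-1)*4) ((xmax+1)*4) 1).filter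
            (fun x => decide (pvP xmin ymin xmax ymax y x)))
        = if pvQ ymin ymax y then pvG xmin xmax y acc else acc := by
      intro acc y _
      by_cases hq : pvQ ymin ymax y
      · rw [if_pos hq]
        unfold pvG
        rcases hq with h | h | h
        · rw [if_neg (by omega), inner_row xmin ymin xmax ymax y acc (Or.inl h)]
        · rw [if_pos h, inner_side xmin ymin xmax ymax y acc h hx]
        · rw [if_neg (by omega), inner_row xmin ymin xmax ymax y acc (Or.inr h)]
      · rw [if_neg hq, inner_skip xmin ymin xmax ymax y acc hq]
    rw [PySem.List.foldl_congr_mem _ _ _ t step, PySem.List.foldl_ite_eq_foldl_filter (pvQ ymin ymax) (fun d y => pvG xmin xmax y d), filtQ ymin ymax hy]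
    simp only [List.foldl_cons, List.foldl_append, List.foldl_map, List.foldl_nil]
    -- first row: top border
    have g0 : pvG xmin xmax ((ymin-1)*4) t = pvRow xmin xmax ((ymin-1)*4) t := by
      unfold pvG; rw [if_neg (by omega)]
    rw [g0]
    -- middle: side borders; last: bottom border
    have gmid : ∀ (acc : List (Int × Int × String)), ∀ j ∈ PySem.List.pyRange (ymin-1) (ymax+1) 1,
        pvG xmin xmax (4*j+2) acc
        = pvPut3 (pvPut3 acc ((xmin-1)*4) (4*j+2) j) ((xmax+1)*4 - 3) (4*j+2) j := by
      intro acc j _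
      unfold pvG
      rw [if_pos (by omega)]
      have e6 : 4*j+2-2 = 4*j := by ring
      have e7 : (xmax+1)*4 - 2 - 1 = (xmax+1)*4 - 3 := by ring
      simp only [PySem.Int.truncdiv]
      rw [e6, e7, Int.mul_tdiv_cancel_left j (by norm_num : (4:Int) ≠ 0)]
    rw [PySem.List.foldl_congr_mem _ _ _ _ gmid]
    have glast : ∀ acc, pvG xmin xmax ((ymax+1)*4 - 1) acc = pvRow xmin xmax ((ymax+1)*4 - 1) acc := by
      intro acc; unfold pvG; rw [if_neg (by omega)]
    rw [glast]
    unfold pvRow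
    rfl
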